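-- pv_equiv track=rewrite | github.com/Arborae/docker2homeassistant | d2ha/docker_service.py | build_stable_id
-- ===== SOURCE A (Python) =====
-- from typing import Any, Dict, Iterable, List, Optional
--
-- def build_stable_id(container_info: Dict[str, Any]) -> str:
--     """Create a stable ID for HA based on stack + container name.
--
--     Avoids Docker IDs so the unique_id stays stable when containers are recreated.
--     """
--
--     stack = container_info.get("stack") or "no_stack"
--     name = container_info.get("name") or "container"
--
--     base = f"{stack}__{name}"
--
--     slug = "".join(ch.lower() if ch.isalnum() else "_" for ch in base)
--
--     while "__" in slug:
--         slug = slug.replace("__", "_")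
--     slug = slug.strip("_")
--
--     if not slug:
--         slug = "container"
--
--     return slug
-- ===== SOURCE B (Python) =====
-- from itertools import groupby
--
--
-- def build_stable_id(container_info):
--     stack = container_info.get("stack") or "no_stack"
--     name = container_info.get("name") or "container"
--     base = f"{stack}__{name}"
--     tokens = ["".join(g).lower() for k, g in groupby(base, key=str.isalnum) if k]
--     return "_".join(tokens) or "container"
-- ===== Notes on version B (the rewrite author's own statement) =====
-- stated objective: simpler
-- what changed: B builds the slug in one tokenize-and-join pass (itertools.groupby on isalnum, lowercase each run, '_'.join), replacing A's map-every-char-to-underscore, repeated replace('__','_') collapse loop and strip('_').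
import Mathlib
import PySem

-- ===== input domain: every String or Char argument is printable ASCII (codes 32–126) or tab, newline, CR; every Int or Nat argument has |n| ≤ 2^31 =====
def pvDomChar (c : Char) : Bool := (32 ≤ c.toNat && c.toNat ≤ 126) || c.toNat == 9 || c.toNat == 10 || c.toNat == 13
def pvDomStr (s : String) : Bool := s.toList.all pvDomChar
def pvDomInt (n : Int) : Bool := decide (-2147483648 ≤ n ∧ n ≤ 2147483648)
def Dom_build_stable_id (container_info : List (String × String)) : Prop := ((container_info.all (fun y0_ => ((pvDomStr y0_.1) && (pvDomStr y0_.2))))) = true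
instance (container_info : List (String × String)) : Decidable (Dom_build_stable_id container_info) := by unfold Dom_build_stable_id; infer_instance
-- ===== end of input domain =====

-- B replaces A's map-to-underscores / collapse-"__"-loop / strip pipeline by one groupby-tokenize-and-join pass (objective: simpler).

-- ===== PORT A =====
-- `x or dflt` on an Optional[str]: None and "" are falsy (shared by both ports)
def pvAOr (x : Option String) (dflt : String) : String :=
  match x with
  | none => dflt
  | some s => if s = "" then dflt else s

-- the genexp character map: ch.lower() if ch.isalnum() else "_"
def pvAMap (c : Char) : Char :=
  if PySem.Chars.isalnum c then PySem.Chars.lowerChar c else '_'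

-- `while "__" in slug: slug = slug.replace("__","_")`; fuel = slug length makes it total
-- (each iteration that runs shortens the string, so the fuel is never exhausted)
def pvALoop : Nat → String → String
  | 0, slug => slug
  | fuel + 1, slug =>
    if PySem.Str.isIn "__" slug then pvALoop fuel (PySem.Str.replace slug "__" "_") else slug

def build_stable_id (container_info : List (String × String)) : String :=
  let stack := pvAOr (PySem.Dict.get? (PySem.Dict.mk container_info) "stack") "no_stack"
  let name := pvAOr (PySem.Dict.get? (PySem.Dict.mk container_info) "name") "container"
  let base := stack ++ "__" ++ name
  let slug0 := String.ofList (base.toList.map pvAMap)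
  let slug1 := pvALoop slug0.toList.length slug0
  let slug2 := PySem.Str.stripChars slug1 "_"
  if slug2 = "" then "container" else slug2

-- ===== PORT B =====
-- itertools.groupby: maximal runs of equal key, in order
def pvBGroupby (key : Char → Bool) : List Char → List (Bool × List Char)
  | [] => []
  | c :: t =>
    match pvBGroupby key t with
    | [] => [(key c, [c])]
    | (k, g) :: rest => if key c = k then (k, c :: g) :: rest else (key c, [c]) :: (k, g) :: rest

def build_stable_id_alt (container_info : List (String × String)) : String :=
  let stack := pvAOr (PySem.Dict.get? (PySem.Dict.mk container_info) "stack") "no_stack"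
  let name := pvAOr (PySem.Dict.get? (PySem.Dict.mk container_info) "name") "container"
  let base := stack ++ "__" ++ name
  let tokens := ((pvBGroupby PySem.Chars.isalnum base.toList).filter (·.1)).map
    (fun g => PySem.Chars.lower g.2)
  let joined := PySem.Chars.join ['_'] tokens
  if joined = [] then "container" else String.ofList joined

-- ===== PRECONDITION & SPEC =====
def Spec_build_stable_id (container_info : List (String × String)) (out : String) : Prop := out = build_stable_id_alt container_info
instance (container_info : List (String × String)) (out : String) : Decidable (Spec_build_stable_id container_info out) := by unfold Spec_build_stable_id; infer_instance

-- ===== CLAIM (what is proved, stated in full; the proofs are below) =====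
def Claim_equal_build_stable_id : Prop := ∀ (container_info : List (String × String)), Dom_build_stable_id container_info → Spec_build_stable_id container_info (build_stable_id container_info)

-- ===== LEMMAS AND PROOFS =====

-- proof-side model of slug.replace("__","_")
def pvRepl2 : List Char → List Char
  | [] => []
  | [c] => [c]
  | c :: d :: t => if c = '_' ∧ d = '_' then '_' :: pvRepl2 t else c :: pvRepl2 (d :: t)

-- proof-side model of the collapse loop's fixed point
def pvCollapse : List Char → List Char
  | [] => []
  | c :: t => if c = '_' ∧ t.head? = some '_' then pvCollapse t else c :: pvCollapse t

-- the maximal runs of non-'_' characters, and their join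
def pvTokens (m : List Char) : List (List Char) :=
  ((pvBGroupby (fun c => c != '_') m).filter (·.1)).map (·.2)

def pvJoinT (m : List Char) : List Char := List.intercalate ['_'] (pvTokens m)

theorem pvGo_zero (l acc : List Char) : PySem.Chars.replace.go ['_','_'] ['_'] 0 l acc = acc.reverse ++ l := rfl
theorem pvGo_nil (n : Nat) (acc : List Char) : PySem.Chars.replace.go ['_','_'] ['_'] (n+1) [] acc = acc.reverse := rfl
theorem pvGo_cons (n : Nat) (c : Char) (t acc : List Char) :
    PySem.Chars.replace.go ['_','_'] ['_'] (n+1) (c::t) acc =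
      if List.isPrefixOf ['_','_'] (c::t) then PySem.Chars.replace.go ['_','_'] ['_'] n (List.drop 2 (c::t)) ('_'::acc)
      else PySem.Chars.replace.go ['_','_'] ['_'] n t (c::acc) := rfl

theorem pvGo_eq (fuel : Nat) : ∀ (l acc : List Char), l.length ≤ fuel →
    PySem.Chars.replace.go ['_','_'] ['_'] fuel l acc = acc.reverse ++ pvRepl2 l := by
  induction fuel with
  | zero =>
    intro l acc h
    have hl : l = [] := List.eq_nil_of_length_eq_zero (Nat.le_zero.mp h)
    subst hl
    simp [pvGo_zero, pvRepl2]
  | succ n ih =>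
    intro l acc h
    match l with
    | [] => simp [pvGo_nil, pvRepl2]
    | [c] =>
      rw [pvGo_cons]
      have hpre : List.isPrefixOf ['_','_'] [c] = false := by
        simp [List.isPrefixOf]
      rw [hpre]
      simp only [Bool.false_eq_true, if_false]
      rw [ih [] (c::acc) (by simp)]
      simp [pvRepl2]
    | c :: d :: t =>
      rw [pvGo_cons]
      by_cases hcd : c = '_' ∧ d = '_'
      · obtain ⟨hc, hd⟩ := hcd
        subst hc; subst hd
        have hpre : List.isPrefixOf ['_','_'] ('_'::'_'::t) = true := by
          simp [List.isPrefixOf]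
        rw [hpre, if_pos rfl]
        simp only [List.drop]
        rw [ih t ('_'::acc) (by simp at h ⊢; omega)]
        simp [pvRepl2]
      · have hpre : List.isPrefixOf ['_','_'] (c::d::t) = false := by
          simp [List.isPrefixOf]
          intro hc hd
          exact absurd ⟨hc.symm, hd.symm⟩ hcd
        rw [hpre]
        simp only [Bool.false_eq_true, if_false]
        rw [ih (d::t) (c::acc) (by simp at h ⊢; omega)]
        simp [pvRepl2, hcd]

theorem pvRepl2_eq (m : List Char) :
    PySem.Chars.replace m ['_', '_'] ['_'] = pvRepl2 m := by
  rw [PySem.Chars.replace]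
  simp only [List.isEmpty_cons, Bool.false_eq_true, if_false]
  rw [pvGo_eq m.length m [] (le_refl _)]
  simp

theorem pvRepl2_head? (m : List Char) : (pvRepl2 m).head? = m.head? := by
  match m with
  | [] => rfl
  | [c] => rfl
  | c :: d :: t =>
    rw [pvRepl2]
    split
    · rename_i h; simp [h.1]
    · simp

theorem pvCollapse_repl2 (m : List Char) : pvCollapse (pvRepl2 m) = pvCollapse m := by
  match m with
  | [] => rfl
  | [c] => rfl
  | c :: d :: t =>
    rw [pvRepl2]
    split
    · rename_i h
      obtain ⟨hc, hd⟩ := h; subst hc; subst hd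
      rw [pvCollapse, pvCollapse, pvCollapse]
      rw [pvRepl2_head?]
      by_cases ht : t.head? = some '_'
      · simp only [ht, List.head?_cons, and_self, if_true]
        exact pvCollapse_repl2 t
      · simp only [List.head?_cons, true_and, ht, if_false, if_true]
        rw [pvCollapse_repl2 t]
    · rename_i h
      rw [pvCollapse, pvCollapse]
      rw [pvRepl2_head?]
      have h' : ¬ (c = '_' ∧ (d :: t).head? = some '_') := by simpa using h
      rw [if_neg h', if_neg h', pvCollapse_repl2 (d :: t)]

theorem pvCollapse_of_not_infix (m : List Char) (h : ¬ ['_', '_'] <:+: m) :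
    pvCollapse m = m := by
  match m with
  | [] => rfl
  | c :: t =>
    rw [pvCollapse]
    have ht : ¬ ['_', '_'] <:+: t := fun hi => h (hi.trans (List.suffix_cons c t).isInfix)
    split
    · rename_i hc
      obtain ⟨h1, h2⟩ := hc
      subst h1
      match t, h2 with
      | c2 :: t', h2 =>
        have hc2 : c2 = '_' := by simpa using h2
        subst hc2
        exact absurd ⟨[], t', by simp⟩ h
    · rw [pvCollapse_of_not_infix t ht]

theorem pvRepl2_length_le (m : List Char) : (pvRepl2 m).length ≤ m.length := by
  match m with
  | [] => simp [pvRepl2]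
  | [c] => simp [pvRepl2]
  | c :: d :: t =>
    rw [pvRepl2]
    split
    · have := pvRepl2_length_le t; simp; omega
    · have := pvRepl2_length_le (d :: t); simp at this ⊢; omega

theorem pvRepl2_length_lt (m : List Char) (h : ['_', '_'] <:+: m) :
    (pvRepl2 m).length < m.length := by
  match m with
  | [] => simp at h
  | [c] => have := h.length_le; simp at this
  | c :: d :: t =>
    rw [pvRepl2]
    split
    · have := pvRepl2_length_le t; simp; omega
    · rename_i hcd
      have h' : ['_', '_'] <:+: (d :: t) := by
        obtain ⟨s, u, hsu⟩ := h
        match s, hsu with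
        | [], hsu => exact absurd ⟨by injection hsu with h1 _; exact h1.symm, by injection hsu with _ h2; injection h2 with h2 _; exact h2.symm⟩ hcd
        | e :: s', hsu =>
          injection hsu with _ h2
          exact ⟨s', u, h2⟩
      have := pvRepl2_length_lt (d :: t) h'
      simp at this ⊢
      omega

theorem pvBG_step_nil (key : Char → Bool) (c : Char) (t : List Char)
    (h : pvBGroupby key t = []) : pvBGroupby key (c :: t) = [(key c, [c])] := by
  rw [pvBGroupby, h]

theorem pvBG_step_cons (key : Char → Bool) (c : Char) (t : List Char) (k : Bool)
    (g : List Char) (rest : List (Bool × List Char)) (h : pvBGroupby key t = (k, g) :: rest) :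
    pvBGroupby key (c :: t) =
      if key c = k then (k, c :: g) :: rest else (key c, [c]) :: (k, g) :: rest := by
  rw [pvBGroupby, h]

theorem pvG0 (key : Char → Bool) (c : Char) (t : List Char) :
    ∃ g rest, pvBGroupby key (c :: t) = (key c, c :: g) :: rest := by
  match h : pvBGroupby key t with
  | [] => exact ⟨[], [], pvBG_step_nil key c t h⟩
  | (k, g) :: rest =>
    rw [pvBG_step_cons key c t k g rest h]
    by_cases hk : key c = k
    · subst hk; rw [if_pos rfl]; exact ⟨g, rest, rfl⟩
    · rw [if_neg hk]; exact ⟨[], (k, g) :: rest, rfl⟩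

theorem pvE1 (t : List Char) : pvTokens ('_' :: t) = pvTokens t := by
  have hu : ('_' != '_') = false := by decide
  match h : pvBGroupby (fun c => c != '_') t with
  | [] =>
    rw [pvTokens, pvBG_step_nil _ _ _ h, pvTokens, h]
    simp [List.filter_cons, hu]
  | (k, g) :: rest =>
    rw [pvTokens, pvBG_step_cons _ _ _ k g rest h, hu, pvTokens, h]
    by_cases hk : false = k
    · rw [if_pos hk, ← hk]
      simp [List.filter_cons]
    · rw [if_neg hk]
      simp [List.filter_cons, hu]

theorem pvE2a (c : Char) (t : List Char) (hc : c ≠ '_') (ht : t.head? = some '_' ∨ t = []) :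
    pvTokens (c :: t) = [c] :: pvTokens t := by
  have hkc : (c != '_') = true := by simp [hc]
  rcases ht with ht | ht
  · match t, ht with
    | d :: t', ht =>
      have hd : d = '_' := by simpa using ht
      subst hd
      obtain ⟨g, rest, hg⟩ := pvG0 (fun c => c != '_') '_' t'
      have hu : ('_' != '_') = false := by decide
      rw [hu] at hg
      rw [pvTokens, pvBG_step_cons _ _ _ false _ rest hg, hkc,
        if_neg (by simp), pvTokens, hg]
      simp [List.filter_cons, hkc]
  · subst ht
    simp [pvTokens, pvBGroupby, hkc]

theorem pvE2b (c d : Char) (t : List Char) (hc : c ≠ '_') (hd : d ≠ '_') :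
    ∃ g gs, pvTokens (d :: t) = g :: gs ∧ pvTokens (c :: d :: t) = (c :: g) :: gs := by
  have hkc : (c != '_') = true := by simp [hc]
  have hkd : (d != '_') = true := by simp [hd]
  obtain ⟨g, rest, hg⟩ := pvG0 (fun c => c != '_') d t
  rw [hkd] at hg
  refine ⟨d :: g, (rest.filter (·.1)).map (·.2), ?_, ?_⟩
  · rw [pvTokens, hg]
    simp [List.filter_cons]
  · rw [pvTokens, pvBG_step_cons _ _ _ true _ rest hg, hkc, if_pos rfl]
    simp [List.filter_cons]

theorem pvE0 (t : List Char) (h : pvTokens t = []) : ∀ x ∈ t, x = '_' := by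
  match t with
  | [] => simp
  | c :: t' =>
    intro x hx
    by_cases hc : c = '_'
    · subst hc
      rw [pvE1] at h
      rcases List.mem_cons.mp hx with h1 | h1
      · exact h1
      · exact pvE0 t' h x h1
    · obtain ⟨g, rest, hg⟩ := pvG0 (fun c => c != '_') c t'
      rw [pvTokens, hg] at h
      have hkc : (c != '_') = true := by simp [hc]
      rw [hkc] at h
      simp [List.filter_cons] at h

theorem pvEok (m : List Char) : ∀ g ∈ pvTokens m, g ≠ [] ∧ ∀ x ∈ g, x ≠ '_' := by
  match m with
  | [] => simp [pvTokens, pvBGroupby]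
  | c :: t =>
    by_cases hc : c = '_'
    · subst hc; rw [pvE1]; exact pvEok t
    · by_cases ht : t.head? = some '_' ∨ t = []
      · rw [pvE2a c t hc ht]
        intro g hg
        rcases List.mem_cons.mp hg with h1 | h1
        · subst h1; exact ⟨by simp, by simpa using hc⟩
        · exact pvEok t g h1
      · push_neg at ht
        obtain ⟨hth, htne⟩ := ht
        match t, htne with
        | d :: t', _ =>
          have hd : d ≠ '_' := fun h => hth (by simp [h])
          obtain ⟨g, gs, h1, h2⟩ := pvE2b c d t' hc hd
          rw [h2]
          intro g' hg'
          rcases List.mem_cons.mp hg' with he | he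
          · subst he
            have := pvEok (d :: t') g (by rw [h1]; simp)
            refine ⟨by simp, ?_⟩
            intro x hx
            rcases List.mem_cons.mp hx with hx | hx
            · subst hx; exact hc
            · exact this.2 x hx
          · exact pvEok (d :: t') g' (by rw [h1]; exact List.mem_cons_of_mem _ he)

def pvLead (m : List Char) : List Char := if m.head? = some '_' then ['_'] else []
def pvTrail (m : List Char) : List Char :=
  if pvTokens m ≠ [] ∧ m.getLast? = some '_' then ['_'] else []


theorem pvGetLast?_cons (c : Char) (t : List Char) (h : t ≠ []) :
    (c :: t).getLast? = t.getLast? := by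
  match t, h with
  | d :: t', _ => simp [List.getLast?_cons_cons]

theorem pvIc_cons2 (g h : List Char) (gs : List (List Char)) :
    List.intercalate ['_'] (g :: h :: gs) = g ++ '_' :: List.intercalate ['_'] (h :: gs) := by
  simp [List.intercalate]

theorem pvCollapse_structure (m : List Char) :
    pvCollapse m = pvLead m ++ pvJoinT m ++ pvTrail m := by
  match m with
  | [] => rfl
  | c :: t =>
    by_cases hc : c = '_'
    · subst hc
      by_cases ht : t.head? = some '_'
      · -- A: collapse m = collapse t
        rw [pvCollapse, if_pos ⟨rfl, ht⟩, pvCollapse_structure t]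
        have hlead : pvLead t = ['_'] := by rw [pvLead, if_pos ht]
        have hleadm : pvLead ('_' :: t) = ['_'] := by rw [pvLead]; simp
        have hJ : pvJoinT ('_' :: t) = pvJoinT t := by rw [pvJoinT, pvJoinT, pvE1]
        have htne : t ≠ [] := by intro h; subst h; simp at ht
        have hTrail : pvTrail ('_' :: t) = pvTrail t := by
          rw [pvTrail, pvTrail, pvE1, pvGetLast?_cons _ _ htne]
        rw [hlead, hleadm, hJ, hTrail]
      · -- B: collapse m = '_' :: collapse t, head t ≠ '_'
        rw [pvCollapse, if_neg (by simp [ht]), pvCollapse_structure t]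
        have hlead : pvLead t = [] := by rw [pvLead, if_neg ht]
        have hleadm : pvLead ('_' :: t) = ['_'] := by rw [pvLead]; simp
        have hJ : pvJoinT ('_' :: t) = pvJoinT t := by rw [pvJoinT, pvJoinT, pvE1]
        rw [hlead, hleadm, hJ]
        by_cases htn : t = []
        · subst htn
          simp [pvTrail, pvJoinT, pvTokens, pvBGroupby]
        · have hTrail : pvTrail ('_' :: t) = pvTrail t := by
            rw [pvTrail, pvTrail, pvE1, pvGetLast?_cons _ _ htn]
          rw [hTrail]
          simp
    · -- c ≠ '_'
      rw [pvCollapse, if_neg (by simp [hc])]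
      have hleadm : pvLead (c :: t) = [] := by rw [pvLead]; simp [hc]
      rw [hleadm, pvCollapse_structure t]
      match t with
      | [] =>
        simp [pvLead, pvJoinT, pvTrail, pvE2a c [] hc (Or.inr rfl), pvTokens, pvBGroupby,
          List.intercalate, hc]
      | d :: t' =>
        by_cases hd : d = '_'
        · subst hd
          have hlead : pvLead ('_' :: t') = ['_'] := by rw [pvLead]; simp
          rw [hlead]
          have hTok : pvTokens (c :: '_' :: t') = [c] :: pvTokens ('_' :: t') :=
            pvE2a c _ hc (Or.inl (by simp))
          by_cases hTt : pvTokens ('_' :: t') = []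
          · -- C2a
            have hJt : pvJoinT ('_' :: t') = [] := by rw [pvJoinT, hTt]; rfl
            have hJm : pvJoinT (c :: '_' :: t') = [c] := by
              rw [pvJoinT, hTok, hTt]; simp [List.intercalate]
            have hTrt : pvTrail ('_' :: t') = [] := by rw [pvTrail]; simp [hTt]
            have hlast : ('_' :: t').getLast? = some '_' := by
              have hall := pvE0 _ hTt
              match hl : ('_' :: t').getLast? with
              | some x =>
                have : x ∈ '_' :: t' := List.mem_of_getLast? hl
                rw [hall x this]
              | none => simp at hl
            have hTrm : pvTrail (c :: '_' :: t') = ['_'] := by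
              rw [pvTrail, if_pos ⟨by rw [hTok]; simp, by
                rw [pvGetLast?_cons _ _ (by simp)]; exact hlast⟩]
            rw [hJt, hJm, hTrt, hTrm]
            simp
          · -- C2b
            obtain ⟨g, gs, hgs⟩ : ∃ g gs, pvTokens ('_' :: t') = g :: gs := by
              match hx : pvTokens ('_' :: t') with
              | [] => exact absurd hx hTt
              | g :: gs => exact ⟨g, gs, rfl⟩
            have hJm : pvJoinT (c :: '_' :: t') = c :: '_' :: pvJoinT ('_' :: t') := by
              rw [pvJoinT, hTok, hgs, pvIc_cons2, pvJoinT, hgs]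
              simp
            have hTrm : pvTrail (c :: '_' :: t') = pvTrail ('_' :: t') := by
              rw [pvTrail, pvTrail, hTok, pvGetLast?_cons _ _ (by simp)]
              simp [hTt]
            rw [hJm, hTrm]
            simp
        · -- C3
          obtain ⟨g, gs, h1, h2⟩ := pvE2b c d t' hc hd
          have hlead : pvLead (d :: t') = [] := by rw [pvLead]; simp [hd]
          have hJm : pvJoinT (c :: d :: t') = c :: pvJoinT (d :: t') := by
            rw [pvJoinT, h2, pvJoinT, h1]
            match gs with
            | [] => simp [List.intercalate]
            | g2 :: gs' => rw [pvIc_cons2, pvIc_cons2]; simp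
          have hTrm : pvTrail (c :: d :: t') = pvTrail (d :: t') := by
            rw [pvTrail, pvTrail, h2, h1, pvGetLast?_cons _ _ (by simp)]
            simp
          rw [hlead, hJm, hTrm]
          simp


theorem pvContains_underscore (c : Char) : (['_'].contains c) = (c == '_') := by
  simp
  exact (Bool.beq_eq_decide_eq c '_').symm

theorem pvDropWhile_head (l : List Char) (h : l.head? ≠ some '_') :
    List.dropWhile (fun c => ['_'].contains c) l = l := by
  match l with
  | [] => rfl
  | c :: t =>
    have hc : c ≠ '_' := by intro he; subst he; simp at h
    rw [List.dropWhile_cons_of_neg]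
    rw [pvContains_underscore]
    simpa using hc

theorem pvStrip_cons (l : List Char) :
    PySem.Chars.stripChars ('_' :: l) ['_'] = PySem.Chars.stripChars l ['_'] := by
  rw [PySem.Chars.stripChars, PySem.Chars.stripChars]
  rw [List.dropWhile_cons_of_pos (by rw [pvContains_underscore]; simp)]

theorem pvStrip_append (l : List Char) :
    PySem.Chars.stripChars (l ++ ['_']) ['_'] = PySem.Chars.stripChars l ['_'] := by
  rw [PySem.Chars.stripChars, PySem.Chars.stripChars]
  rw [List.dropWhile_append]
  by_cases h : (List.dropWhile (fun c => ['_'].contains c) l).isEmpty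
  · rw [if_pos h]
    have h2 : List.dropWhile (fun c => ['_'].contains c) l = [] := by
      simpa [List.isEmpty_iff] using h
    rw [h2]
    have h3 : List.dropWhile (fun c => ['_'].contains c) ['_'] = ([] : List Char) := by
      rw [List.dropWhile_cons_of_pos (by rw [pvContains_underscore]; simp)]
      rfl
    rw [h3]
  · rw [if_neg h]
    rw [List.reverse_append]
    have hrev : (['_'] : List Char).reverse = ['_'] := rfl
    rw [hrev, List.singleton_append]
    rw [List.dropWhile_cons_of_pos (by rw [pvContains_underscore]; simp)]

theorem pvStrip_self (l : List Char) (h1 : l.head? ≠ some '_') (h2 : l.getLast? ≠ some '_') :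
    PySem.Chars.stripChars l ['_'] = l := by
  rw [PySem.Chars.stripChars]
  rw [pvDropWhile_head l h1]
  rw [pvDropWhile_head l.reverse (by rwa [List.head?_reverse])]
  exact List.reverse_reverse l

theorem pvIc_ne_nil (g : List Char) (gs : List (List Char)) (hg : g ≠ []) :
    List.intercalate ['_'] (g :: gs) ≠ [] := by
  match gs with
  | [] => simpa [List.intercalate] using hg
  | h :: gs' => rw [pvIc_cons2]; simp [hg]

theorem pvIc_head_last (ts : List (List Char))
    (hok : ∀ g ∈ ts, g ≠ [] ∧ ∀ x ∈ g, x ≠ '_') :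
    (List.intercalate ['_'] ts).head? ≠ some '_' ∧
    (List.intercalate ['_'] ts).getLast? ≠ some '_' := by
  match ts with
  | [] => simp [List.intercalate]
  | [g] =>
    obtain ⟨hg, hx⟩ := hok g (by simp)
    have hic : List.intercalate ['_'] [g] = g := by simp [List.intercalate]
    rw [hic]
    constructor
    · intro h; exact hx '_' (List.mem_of_mem_head? (by rw [h]; rfl)) rfl
    · intro h; exact hx '_' (List.mem_of_getLast? h) rfl
  | g :: h :: gs =>
    obtain ⟨hg, hx⟩ := hok g (by simp)
    have ih := pvIc_head_last (h :: gs) (fun g' hg' => hok g' (List.mem_cons_of_mem _ hg'))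
    rw [pvIc_cons2]
    constructor
    · match g, hg with
      | a :: g', _ =>
        simp only [List.cons_append, List.head?_cons]
        intro he
        exact hx '_' (by rw [← Option.some_inj.mp he]; simp) rfl
    · rw [List.getLast?_append]
      have hne : List.intercalate ['_'] (h :: gs) ≠ [] :=
        pvIc_ne_nil h gs (hok h (by simp)).1
      have hgl : ('_' :: List.intercalate ['_'] (h :: gs)).getLast? =
          (List.intercalate ['_'] (h :: gs)).getLast? := pvGetLast?_cons _ _ hne
      rw [hgl]
      match hl : (List.intercalate ['_'] (h :: gs)).getLast? with
      | some x =>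
        have hor : (some x).or g.getLast? = some x := rfl
        rw [hor, ← hl]
        exact ih.2
      | none => exact absurd (by simpa using hl) hne

theorem pvStrip_collapse (m : List Char) :
    PySem.Chars.stripChars (pvCollapse m) ['_'] = pvJoinT m := by
  rw [pvCollapse_structure m]
  have hok := pvEok m
  have hJ := pvIc_head_last (pvTokens m) hok
  have step1 : PySem.Chars.stripChars (pvLead m ++ pvJoinT m ++ pvTrail m) ['_']
      = PySem.Chars.stripChars (pvJoinT m ++ pvTrail m) ['_'] := by
    by_cases hl : m.head? = some '_'
    · rw [pvLead, if_pos hl]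
      have hx : (['_'] : List Char) ++ pvJoinT m ++ pvTrail m
          = '_' :: (pvJoinT m ++ pvTrail m) := by simp
      rw [hx, pvStrip_cons]
    · rw [pvLead, if_neg hl]
      simp
  rw [step1]
  have step2 : PySem.Chars.stripChars (pvJoinT m ++ pvTrail m) ['_']
      = PySem.Chars.stripChars (pvJoinT m) ['_'] := by
    by_cases ht : pvTokens m ≠ [] ∧ m.getLast? = some '_'
    · rw [pvTrail, if_pos ht]
      rw [pvStrip_append]
    · rw [pvTrail, if_neg ht]
      simp
  rw [step2]
  exact pvStrip_self _ hJ.1 hJ.2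

theorem pvLower_ne (c : Char) (h : PySem.Chars.isalnum c = true) :
    PySem.Chars.lowerChar c ≠ '_' := by
  rw [PySem.Chars.isalnum, PySem.Chars.isalpha, PySem.Chars.isupper, PySem.Chars.islower,
    PySem.Chars.isdigit] at h
  rw [PySem.Chars.lowerChar, PySem.Chars.isupper]
  intro he
  by_cases hu : (decide ('A' ≤ c) && decide (c ≤ 'Z')) = true
  · rw [if_pos hu] at he
    simp only [Bool.and_eq_true, decide_eq_true_eq] at hu
    have h1 : 65 ≤ c.toNat := hu.1
    have h2 : c.toNat ≤ 90 := hu.2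
    have hv : (Char.ofNat (c.toNat + 32)).toNat = c.toNat + 32 := by
      rw [Char.toNat_ofNat]
      rw [if_pos (by left; omega)]
    rw [he] at hv
    have : ('_').toNat = 95 := by decide
    omega
  · rw [if_neg hu] at he
    subst he
    simp only [Bool.and_eq_true, decide_eq_true_eq, Bool.or_eq_true] at h hu
    have h95 : ('_').toNat = 95 := rfl
    have ha : ('a' ≤ '_') → False := by decide
    rcases h with (h | h) | h
    · exact hu h
    · exact ha h.1
    · have : ('0' ≤ '_') ∧ ('_' ≤ '9') → False := by decide
      exact this h


theorem pvAMap_key (c : Char) : ((pvAMap c) != '_') = PySem.Chars.isalnum c := by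
  rw [pvAMap]
  by_cases h : PySem.Chars.isalnum c = true
  · rw [if_pos h, h]
    simpa using pvLower_ne c h
  · rw [if_neg h]
    simp only [bne_self_eq_false]
    exact (Bool.not_eq_true _).mp (fun ht => h ht) |>.symm

theorem pvBG_map (l : List Char) :
    pvBGroupby (fun c => c != '_') (l.map pvAMap)
      = (pvBGroupby PySem.Chars.isalnum l).map (fun g => (g.1, g.2.map pvAMap)) := by
  match l with
  | [] => rfl
  | c :: t =>
    have ih := pvBG_map t
    match h : pvBGroupby PySem.Chars.isalnum t with
    | [] =>
      rw [h] at ih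
      rw [List.map_cons, pvBG_step_nil _ _ _ (by rw [ih]; rfl),
        pvBG_step_nil _ _ _ h]
      simp [pvAMap_key]
    | (k, g) :: rest =>
      rw [h] at ih
      rw [List.map_cons, pvBG_step_cons _ _ _ k (g.map pvAMap) (rest.map (fun g => (g.1, g.2.map pvAMap))) (by rw [ih]; rfl),
        pvBG_step_cons _ _ _ k g rest h]
      rw [show ((pvAMap c) != '_') = PySem.Chars.isalnum c from pvAMap_key c]
      by_cases hk : PySem.Chars.isalnum c = k
      · rw [if_pos hk, if_pos hk]; rfl
      · rw [if_neg hk, if_neg hk]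
        simp [pvAMap_key]

theorem pvGI (key : Char → Bool) (l : List Char) :
    ∀ k g, (k, g) ∈ pvBGroupby key l → ∀ x ∈ g, key x = k := by
  match l with
  | [] => simp [pvBGroupby]
  | c :: t =>
    intro k g hmem x hx
    match h : pvBGroupby key t with
    | [] =>
      rw [pvBG_step_nil _ _ _ h] at hmem
      simp at hmem
      obtain ⟨hk, hg⟩ := hmem
      subst hk; subst hg
      simp at hx
      subst hx; rfl
    | (k', g') :: rest =>
      rw [pvBG_step_cons _ _ _ k' g' rest h] at hmem
      by_cases hkc : key c = k'
      · rw [if_pos hkc] at hmem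
        rcases List.mem_cons.mp hmem with he | he
        · obtain ⟨hk, hg⟩ : k = k' ∧ g = c :: g' := by simpa using he
          subst hk; subst hg
          rcases List.mem_cons.mp hx with hx | hx
          · subst hx; exact hkc
          · exact pvGI key t k g' (by rw [h]; simp) x hx
        · exact pvGI key t k g (by rw [h]; exact List.mem_cons_of_mem _ he) x hx
      · rw [if_neg hkc] at hmem
        rcases List.mem_cons.mp hmem with he | he
        · obtain ⟨hk, hg⟩ : k = key c ∧ g = [c] := by simpa using he
          subst hk; subst hg
          simp at hx; subst hx; rfl
        · exact pvGI key t k g (by rw [h]; exact he) x hx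

theorem pvTokens_map (l : List Char) :
    ((pvBGroupby PySem.Chars.isalnum l).filter (·.1)).map (fun g => PySem.Chars.lower g.2)
      = pvTokens (l.map pvAMap) := by
  rw [pvTokens, pvBG_map]
  rw [List.filter_map]
  rw [List.map_map]
  apply List.map_congr_left
  intro g hg
  have hmem := List.mem_of_mem_filter hg
  have htrue : g.1 = true := by
    have := List.of_mem_filter hg
    simpa using this
  have hal : ∀ x ∈ g.2, PySem.Chars.isalnum x = true := by
    intro x hx
    have := pvGI PySem.Chars.isalnum l g.1 g.2 (by rwa [← Prod.mk.eta (p := g)] at hmem) x hx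
    rw [htrue] at this; exact this
  show PySem.Chars.lower g.2 = g.2.map pvAMap
  rw [PySem.Chars.lower]
  apply List.map_congr_left
  intro x hx
  rw [pvAMap, if_pos (hal x hx)]

theorem pvALoop_eq (fuel : Nat) : ∀ (s : String), s.toList.length ≤ fuel →
    (pvALoop fuel s).toList = pvCollapse s.toList := by
  induction fuel with
  | zero =>
    intro s h
    have : s.toList = [] := List.eq_nil_of_length_eq_zero (Nat.le_zero.mp h)
    rw [pvALoop, this]
    rfl
  | succ n ih =>
    intro s h
    rw [pvALoop]
    by_cases hin : PySem.Str.isIn "__" s = true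
    · rw [if_pos hin]
      have hinf : ['_','_'] <:+: s.toList := by
        have := (PySem.Str.isIn_iff_infix (sub := "__") (s := s)).mp hin
        simpa using this
      have hrepl : (PySem.Str.replace s "__" "_").toList = pvRepl2 s.toList := by
        rw [PySem.Str.toList_replace]
        show PySem.Chars.replace s.toList "__".toList "_".toList = _
        have h1 : "__".toList = ['_','_'] := by decide
        have h2 : "_".toList = ['_'] := by decide
        rw [h1, h2, pvRepl2_eq]
      have hlt := pvRepl2_length_lt s.toList hinf
      rw [ih _ (by rw [hrepl]; omega), hrepl, pvCollapse_repl2]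
    · rw [if_neg hin]
      have hninf : ¬ ['_','_'] <:+: s.toList := by
        intro hi
        apply hin
        apply (PySem.Str.isIn_iff_infix (sub := "__") (s := s)).mpr
        simpa using hi
      rw [pvCollapse_of_not_infix _ hninf]

theorem pvToList_empty_iff (s : String) : s = "" ↔ s.toList = [] := by
  constructor
  · intro h; subst h; rfl
  · intro h; apply String.ext; rw [h]; rfl

theorem pvCore (base : String) :
    (let slug0 := String.ofList (base.toList.map pvAMap)
     let slug1 := pvALoop slug0.toList.length slug0
     let slug2 := PySem.Str.stripChars slug1 "_"
     if slug2 = "" then "container" else slug2)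
    = (let tokens := ((pvBGroupby PySem.Chars.isalnum base.toList).filter (·.1)).map
         (fun g => PySem.Chars.lower g.2)
       let joined := PySem.Chars.join ['_'] tokens
       if joined = [] then "container" else String.ofList joined) := by
  simp only []
  set m := base.toList.map pvAMap with hm
  have h0 : (String.ofList m).toList = m := by simp
  have h1 : (pvALoop (String.ofList m).toList.length (String.ofList m)).toList
      = pvCollapse m := by
    rw [pvALoop_eq _ _ (le_refl _), h0]
  have h2 : (PySem.Str.stripChars (pvALoop (String.ofList m).toList.length (String.ofList m)) "_").toList
      = pvJoinT m := by
    rw [PySem.Str.toList_stripChars, h1]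
    have : ("_" : String).toList = ['_'] := rfl
    rw [this, pvStrip_collapse]
  have h3 : PySem.Chars.join ['_'] (((pvBGroupby PySem.Chars.isalnum base.toList).filter (·.1)).map
      (fun g => PySem.Chars.lower g.2)) = pvJoinT m := by
    rw [pvTokens_map, PySem.Chars.join, pvJoinT, hm]
  rw [h3]
  by_cases hemp : pvJoinT m = []
  · rw [if_pos hemp]
    rw [if_pos ((pvToList_empty_iff _).mpr (by rw [h2, hemp]))]
  · rw [if_neg hemp]
    rw [if_neg (fun hc => hemp (by rw [← h2, (pvToList_empty_iff _).mp hc]))]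
    apply String.ext
    rw [h2]
    simp

-- ===== VERDICT (by name: the statement is the Claim_ definition above) =====
theorem build_stable_id_spec : Claim_equal_build_stable_id := by
  intro ci _
  show build_stable_id ci = build_stable_id_alt ci
  rw [build_stable_id, build_stable_id_alt]
  exact pvCore _
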